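-- pv_equiv track=rewrite | github.com/jennychiou/7-Experiment | LyricsGeneration/nn_midi_trainer-master/nn_midi_trainer/(test)readmidi_nn.py | makeMidi_nn
-- ===== SOURCE A (Python) =====
-- def makeMidi_nn(playlist = [], length = 1):
--
--     X = []
--
--     setX = []
--     set_y = []
--     count = 0
--
--     # play = [ notes ]
--     for i in range(len(playlist)-1):
--         play = playlist[i]
--         one = _makeHOT(play)
--
--         X.append(one)
--         count += 1
--
--         if count >= length:
--
--             _y = _makeHOT(playlist[i+1])
--
--             setX.append(X)
--             set_y.append(_y)
--             preX = X[1:]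
--             X = []
--             for i in preX:
--                 X.append(i)
--
--     return setX, set_y
--
-- def _makeHOT(indexs = []):
--     hot = []
--     for i in range(1,89):
--         if i in indexs:
--             hot.append(1)
--         else:
--             hot.append(0)
--
--     return hot
-- ===== SOURCE B (Python) =====
-- def _makeHOT(indexs=[]):
--     return [1 if i in indexs else 0 for i in range(1, 89)]
--
-- def makeMidi_nn(playlist=[], length=1):
--     hots = [_makeHOT(p) for p in playlist]
--     w = max(length, 1)
--     starts = range(0, len(playlist) - w)
--     setX = [hots[s:s + w] for s in starts]
--     set_y = [hots[s + w] for s in starts]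
--     return setX, set_y
-- ===== Notes on version B (the rewrite author's own statement) =====
-- stated objective: simpler
-- what changed: B precomputes the one-hot table once and slices it into windows with a closed-form start range (w = max(length,1), starts = range(0, n-w)), replacing A's running buffer with its accumulate, append, trim-and-recopy bookkeeping.
import Mathlib
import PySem

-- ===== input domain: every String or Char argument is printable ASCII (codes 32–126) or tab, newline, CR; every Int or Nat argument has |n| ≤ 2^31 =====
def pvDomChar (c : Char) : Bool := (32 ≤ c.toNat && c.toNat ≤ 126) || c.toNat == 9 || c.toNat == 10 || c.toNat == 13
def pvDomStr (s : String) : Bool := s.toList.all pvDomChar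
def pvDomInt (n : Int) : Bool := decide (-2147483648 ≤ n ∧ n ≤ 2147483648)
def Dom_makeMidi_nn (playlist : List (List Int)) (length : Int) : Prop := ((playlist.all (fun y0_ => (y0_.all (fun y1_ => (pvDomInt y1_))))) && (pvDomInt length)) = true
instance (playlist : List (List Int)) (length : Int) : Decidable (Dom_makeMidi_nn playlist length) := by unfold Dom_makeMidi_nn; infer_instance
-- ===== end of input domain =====

-- B replaces A's running window buffer by a precomputed one-hot table sliced
-- into windows with a closed-form start range; same return value, simpler code.

-- ===== PORT A =====
-- _makeHOT of A: builds the 0/1 list by appending inside a loop over range(1,89)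
def pyMakeHOT (indexs : List Int) : List Int :=
  (PySem.List.pyRange 1 89 1).foldl
    (fun hot i => if i ∈ indexs then hot ++ [(1 : Int)] else hot ++ [(0 : Int)]) []

-- loop body of A's main for-loop; state = (X, setX, set_y, count)
def makeMidiStepA (playlist : List (List Int)) (length : Int)
    (st : List (List Int) × List (List (List Int)) × List (List Int) × Int) (i : Int) :
    List (List Int) × List (List (List Int)) × List (List Int) × Int :=
  let (X, setX, set_y, count) := st
  let play := PySem.List.pyGetD playlist i []
  let one := pyMakeHOT play
  let X1 := X ++ [one]
  let count1 := count + 1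
  if count1 ≥ length then
    let y := pyMakeHOT (PySem.List.pyGetD playlist (i + 1) [])
    let setX1 := setX ++ [X1]
    let set_y1 := set_y ++ [y]
    let preX := PySem.List.slice X1 (some 1) none
    let X2 := preX.foldl (fun acc e => acc ++ [e]) []
    (X2, setX1, set_y1, count1)
  else (X1, setX, set_y, count1)

def makeMidi_nn (playlist : List (List Int)) (length : Int) :
    List (List (List Int)) × List (List Int) :=
  let r := (PySem.List.pyRange 0 ((playlist.length : Int) - 1) 1).foldl
      (makeMidiStepA playlist length) ([], [], [], 0)
  (r.2.1, r.2.2.1)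

-- ===== PORT B =====
-- _makeHOT of B: a comprehension over range(1,89)
def pyMakeHOTalt (indexs : List Int) : List Int :=
  (PySem.List.pyRange 1 89 1).map (fun i => if i ∈ indexs then (1 : Int) else 0)

def makeMidi_nn_alt (playlist : List (List Int)) (length : Int) :
    List (List (List Int)) × List (List Int) :=
  let hots := playlist.map pyMakeHOTalt
  let w := max length 1
  let starts := PySem.List.pyRange 0 ((playlist.length : Int) - w) 1
  let setX := starts.map (fun s => PySem.List.slice hots (some s) (some (s + w)))
  let set_y := starts.map (fun s => PySem.List.pyGetD hots (s + w) [])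
  (setX, set_y)

-- ===== PRECONDITION & SPEC =====
def Spec_makeMidi_nn (playlist : List (List Int)) (length : Int) (out : List (List (List Int)) × List (List Int)) : Prop := out = makeMidi_nn_alt playlist length
instance (playlist : List (List Int)) (length : Int) (out : List (List (List Int)) × List (List Int)) : Decidable (Spec_makeMidi_nn playlist length out) := by unfold Spec_makeMidi_nn; infer_instance

-- ===== CLAIM (what is proved, stated in full; the proofs are below) =====
def Claim_equal_makeMidi_nn : Prop := ∀ (playlist : List (List Int)) (length : Int), Dom_makeMidi_nn playlist length → Spec_makeMidi_nn playlist length (makeMidi_nn playlist length)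

-- ===== LEMMAS AND PROOFS =====

theorem hot_eq (p : List Int) : pyMakeHOT p = pyMakeHOTalt p := by
  unfold pyMakeHOT pyMakeHOTalt
  have h : ∀ (hot : List Int) (i : Int),
      (if i ∈ p then hot ++ [(1 : Int)] else hot ++ [(0 : Int)])
        = hot ++ [if i ∈ p then (1 : Int) else 0] := by
    intro hot i; split <;> rfl
  simp only [h]
  rw [PySem.List.foldl_append_singleton_eq_map]
  simp

-- the copy loop 'X=[]; for i in preX: X.append(i)' is the identity
theorem copy_loop (l : List (List Int)) :
    l.foldl (fun acc e => acc ++ [e]) [] = l := by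
  rw [PySem.List.foldl_append_singleton_eq_self]; simp

-- loop invariant for A's fold after k iterations
theorem loopA (playlist : List (List Int)) (length : Int) (k : Nat)
    (hk : k + 1 ≤ playlist.length) :
    (PySem.List.pyRange 0 (k : Int) 1).foldl (makeMidiStepA playlist length) ([], [], [], 0)
      = (((playlist.map pyMakeHOTalt).take k).drop (k + 1 - (max length 1).toNat),
         (List.range (k + 1 - (max length 1).toNat)).map
           (fun s => ((playlist.map pyMakeHOTalt).drop s).take (max length 1).toNat),
         (List.range (k + 1 - (max length 1).toNat)).map
           (fun s => (playlist.map pyMakeHOTalt).getD (s + (max length 1).toNat) []),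
         (k : Int)) := by
  induction k with
  | zero =>
      have hwn : 1 ≤ (max length 1).toNat := by omega
      simp [PySem.List.pyRange_one_eq_nil, Nat.sub_eq_zero_of_le hwn]
  | succ k ih =>
      have hw1 : (1 : Int) ≤ max length 1 := le_max_right _ _
      have hwnat : ((max length 1).toNat : Int) = max length 1 := Int.toNat_of_nonneg (by omega)
      set wn := (max length 1).toNat with hwn
      have hwn1 : 1 ≤ wn := by omega
      set hots := playlist.map pyMakeHOTalt with hh
      have hkn : k < playlist.length := by omega
      have hk1n : k + 1 < playlist.length := by omega
      have hlh : hots.length = playlist.length := by simp [hh]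
      have hgetk : PySem.List.pyGetD playlist (k : Int) [] = playlist[k] := by
        rw [PySem.List.pyGetD_natCast, List.getD_eq_getElem _ _ hkn]
      have hgetk1 : PySem.List.pyGetD playlist ((k : Int) + 1) [] = playlist[k + 1] := by
        have : (k : Int) + 1 = ((k + 1 : Nat) : Int) := by push_cast; ring
        rw [this, PySem.List.pyGetD_natCast, List.getD_eq_getElem _ _ hk1n]
      have hhotk : pyMakeHOT playlist[k] = hots[k]'(by omega) := by
        rw [hot_eq]; simp [hh]
      have hhotk1 : pyMakeHOT playlist[k + 1] = hots.getD (k + 1) [] := by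
        rw [hot_eq, List.getD_eq_getElem _ _ (by omega : k + 1 < hots.length)]; simp [hh]
      have htakek : k ≤ hots.length := by omega
      have htake1 : hots.take (k + 1) = hots.take k ++ [hots[k]'(by omega)] := by
        rw [List.take_add_one]; simp [List.getElem?_eq_getElem (by omega : k < hots.length)]
      have hdropapp : ∀ j : Nat, j ≤ k →
          (hots.take (k + 1)).drop j = (hots.take k).drop j ++ [hots[k]'(by omega)] := by
        intro j hj
        rw [htake1, List.drop_append_of_le_length (by simp [List.length_take]; omega)]
      have hrange : PySem.List.pyRange 0 ((k : Int) + 1) 1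
          = PySem.List.pyRange 0 (k : Int) 1 ++ [(k : Int)] := by
        rw [PySem.List.pyRange_one_succ_right (by omega)]
      have hcast : ((k + 1 : Nat) : Int) = (k : Int) + 1 := by push_cast; ring
      rw [hcast, hrange, List.foldl_append, ih (by omega)]
      simp only [List.foldl_cons, List.foldl_nil]
      unfold makeMidiStepA
      simp only [hgetk, hgetk1, hhotk, hhotk1]
      by_cases hc : wn ≤ k + 1
      · have hcond : (k : Int) + 1 ≥ length := by omega
        rw [if_pos hcond]
        have hX1 : (hots.take k).drop (k + 1 - wn) ++ [hots[k]'(by omega)]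
            = (hots.take (k + 1)).drop (k + 1 - wn) := (hdropapp _ (by omega)).symm
        simp only [hX1]
        refine Prod.ext ?_ (Prod.ext ?_ (Prod.ext ?_ ?_)) <;> simp only
        · -- new X
          rw [PySem.List.slice_from_one, copy_loop, List.tail_drop]
          congr 1; omega
        · -- setX
          rw [show k + 1 + 1 - wn = (k + 1 - wn) + 1 from by omega, List.range_succ,
            List.map_append]
          congr 1
          simp only [List.map_cons, List.map_nil]
          congr 1
          rw [List.drop_take]
          congr 1; omega
        · -- set_y
          rw [show k + 1 + 1 - wn = (k + 1 - wn) + 1 from by omega, List.range_succ,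
            List.map_append]
          congr 1
          simp only [List.map_cons, List.map_nil]
          congr 2; omega
      · have hcond : ¬ ((k : Int) + 1 ≥ length) := by omega
        rw [if_neg hcond]
        have h0 : k + 1 - wn = 0 := by omega
        have h1 : k + 1 + 1 - wn = 0 := by omega
        refine Prod.ext ?_ (Prod.ext ?_ (Prod.ext ?_ ?_)) <;> simp only
        · rw [h0, h1, List.drop_zero, List.drop_zero, htake1]
        · rw [h0, h1]
        · rw [h0, h1]

-- ===== VERDICT (by name: the statement is the Claim_ definition above) =====
theorem makeMidi_nn_spec : Claim_equal_makeMidi_nn := by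
  intro playlist length _
  unfold Spec_makeMidi_nn
  simp only [makeMidi_nn, makeMidi_nn_alt]
  have hw1 : (1 : Int) ≤ max length 1 := le_max_right _ _
  have hwnat : (((max length 1).toNat : Nat) : Int) = max length 1 :=
    Int.toNat_of_nonneg (by omega)
  rcases Nat.eq_zero_or_pos playlist.length with h0 | hpos
  · rw [PySem.List.pyRange_one_eq_nil (by omega : ((playlist.length : Int) - 1) ≤ 0),
        PySem.List.pyRange_one_eq_nil (by omega : ((playlist.length : Int) - max length 1) ≤ 0)]
    simp
  · have hcast : ((playlist.length : Int) - 1) = ((playlist.length - 1 : Nat) : Int) := by omega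
    rw [hcast, loopA playlist length (playlist.length - 1) (by omega)]
    have hr : playlist.length - 1 + 1 - (max length 1).toNat
        = playlist.length - (max length 1).toNat := by omega
    have hbr : PySem.List.pyRange 0 ((playlist.length : Int) - max length 1) 1
        = (List.range (playlist.length - (max length 1).toNat)).map (fun (k : Nat) => (k : Int)) := by
      rcases Nat.le_total (max length 1).toNat playlist.length with hle | hlt
      · have h2 : ((playlist.length : Int) - max length 1)
            = ((playlist.length - (max length 1).toNat : Nat) : Int) := by omega
        rw [h2, PySem.List.pyRange_zero_natCast]
      · rw [PySem.List.pyRange_one_eq_nil (by omega),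
          Nat.sub_eq_zero_of_le hlt]
        simp
    simp only [hr, hbr, List.map_map]
    refine Prod.ext ?_ ?_ <;> simp only
    · refine (List.map_congr_left (fun j _ => ?_)).symm
      simp only [Function.comp_apply]
      have hb : (j : Int) + max length 1 = ((j + (max length 1).toNat : Nat) : Int) := by
        push_cast [hwnat]; ring
      rw [hb, PySem.List.slice_natCast]
      congr 1; omega
    · refine (List.map_congr_left (fun j _ => ?_)).symm
      simp only [Function.comp_apply]
      have hb : (j : Int) + max length 1 = ((j + (max length 1).toNat : Nat) : Int) := by
        push_cast [hwnat]; ring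
      rw [hb, PySem.List.pyGetD_natCast]
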